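-- pv_equiv track=rewrite | github.com/Anson2251/cie-certificate-and-ucas-info-exact | parse_ucas_statement.py | _parse_personal_statement
-- ===== SOURCE A (Python) =====
-- def _parse_personal_statement(raw_text: str) -> tuple[str, str, str]:
--     questions = [
--         "Why do you want to study this course or subject?",
--         "How have your qualifications and studies helped you to prepare for this course or subject?",
--         "What else have you done to prepare outside of education, and why are these experiences useful?",
--     ]
--
--     sections = []
--     lines = [i.strip() for i in raw_text.split("\n") if (len(i.strip()) > 0)]
--
--     question_indices = [
--         i for i, line in enumerate(lines) if any(q in line for q in questions)
--     ]
--     question_indices.append(len(lines))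
--
--     for idx in range(len(question_indices) - 1):
--         start_index = question_indices[idx]
--         end_index = question_indices[idx + 1]
--
--         section_lines = lines[start_index + 1 : end_index]
--         section_text = " ".join(section_lines).strip()
--         sections.append(section_text)
--
--     while len(sections) < 3:
--         sections.append("")
--
--     return sections[0], sections[1], sections[2]
-- ===== SOURCE B (Python) =====
-- QUESTIONS = [
--     "Why do you want to study this course or subject?",
--     "How have your qualifications and studies helped you to prepare for this course or subject?",
--     "What else have you done to prepare outside of education, and why are these experiences useful?",
-- ]
--
--
-- def _parse_personal_statement(raw_text: str) -> tuple[str, str, str]: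
--     sections = []
--     started = False
--     current = []
--     for line in raw_text.split("\n"):
--         line = line.strip()
--         if not line:
--             continue
--         if any(q in line for q in QUESTIONS):
--             if started:
--                 sections.append(" ".join(current).strip())
--                 current = []
--             else:
--                 started = True
--         elif started:
--             current.append(line)
--     if started:
--         sections.append(" ".join(current).strip())
--     padded = sections + ["", "", ""]
--     return padded[0], padded[1], padded[2]
-- ===== Notes on version B (the rewrite author's own statement) =====
-- stated objective: alternative
-- what changed: Replaced A's three-pass design (build an index table of question lines via enumerate, then slice the line list between consecutive indices, then pad) by a single state-machine pass over the lines that accumulates the current section and flushes it at each question line.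
import Mathlib
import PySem

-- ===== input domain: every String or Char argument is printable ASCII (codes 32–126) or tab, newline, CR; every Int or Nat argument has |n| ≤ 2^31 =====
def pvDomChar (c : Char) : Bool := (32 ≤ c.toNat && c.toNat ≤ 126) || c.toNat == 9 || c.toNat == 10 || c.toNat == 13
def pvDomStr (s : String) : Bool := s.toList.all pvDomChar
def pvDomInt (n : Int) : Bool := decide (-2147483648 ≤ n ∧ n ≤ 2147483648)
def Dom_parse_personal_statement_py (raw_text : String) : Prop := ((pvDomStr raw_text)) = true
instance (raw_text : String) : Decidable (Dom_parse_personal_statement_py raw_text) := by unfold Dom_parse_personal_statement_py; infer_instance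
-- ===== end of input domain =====

-- B replaces A's index-table-then-slicing passes by a single state-machine pass over the lines (alternative decomposition, same cost).


-- the three question strings (the same literal list appears in both Pythons)
def pvQuestions : List String :=
  [ "Why do you want to study this course or subject?",
    "How have your qualifications and studies helped you to prepare for this course or subject?",
    "What else have you done to prepare outside of education, and why are these experiences useful?" ]

-- ===== PORT A =====
-- while len(sections) < 3: sections.append("")
def pvPadA (sections : List String) : List String :=
  if h : sections.length < 3 then pvPadA (sections ++ [""]) else sections
termination_by 3 - sections.length
decreasing_by simp; omega

def parse_personal_statement_py (raw_text : String) : String × String × String :=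
  let questions := pvQuestions
  -- raw_text.split("\n") : "\n" ≠ "" so split? never returns none
  let lines := (((PySem.Str.split? raw_text "\n").getD []).filter
      (fun i => PySem.Str.len (PySem.Str.strip i) > 0)).map PySem.Str.strip
  let question_indices := ((PySem.List.enumerate lines).filter
      (fun p => questions.any (fun q => PySem.Str.isIn q p.2))).map (·.1)
  let question_indices := question_indices ++ [(lines.length : Int)]
  let sections := (PySem.List.pyRange 0 ((question_indices.length : Int) - 1) 1).foldl
    (fun sections idx =>
      let start_index := PySem.List.pyGetD question_indices idx 0
      let end_index := PySem.List.pyGetD question_indices (idx + 1) 0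
      let section_lines := PySem.List.slice lines (some (start_index + 1)) (some end_index)
      let section_text := PySem.Str.strip (PySem.Str.join " " section_lines)
      sections ++ [section_text]) []
  let sections := pvPadA sections
  (PySem.List.pyGetD sections 0 "", PySem.List.pyGetD sections 1 "", PySem.List.pyGetD sections 2 "")

-- ===== PORT B =====
-- any(q in line for q in QUESTIONS)
def pvIsQ (line : String) : Bool := pvQuestions.any (fun q => PySem.Str.isIn q line)

-- " ".join(current).strip()
def pvSecText (current : List String) : String := PySem.Str.strip (PySem.Str.join " " current)

-- the loop body of B; state = (started, current, sections)
def pvStepB (st : Bool × List String × List String) (line : String) : Bool × List String × List String :=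
  let line := PySem.Str.strip line
  if PySem.Str.len line = 0 then st
  else if pvIsQ line then
    (if st.1 then (true, [], st.2.2 ++ [pvSecText st.2.1]) else (true, st.2.1, st.2.2))
  else if st.1 then (st.1, st.2.1 ++ [line], st.2.2) else st

def parse_personal_statement_py_alt (raw_text : String) : String × String × String :=
  let st := ((PySem.Str.split? raw_text "\n").getD []).foldl pvStepB (false, [], [])
  let sections := if st.1 then st.2.2 ++ [pvSecText st.2.1] else st.2.2
  let padded := sections ++ ["", "", ""]
  (PySem.List.pyGetD padded 0 "", PySem.List.pyGetD padded 1 "", PySem.List.pyGetD padded 2 "")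

-- ===== PRECONDITION & SPEC =====
def Spec_parse_personal_statement_py (raw_text : String) (out : String × String × String) : Prop := out = parse_personal_statement_py_alt raw_text
instance (raw_text : String) (out : String × String × String) : Decidable (Spec_parse_personal_statement_py raw_text out) := by unfold Spec_parse_personal_statement_py; infer_instance

-- ===== CLAIM (what is proved, stated in full; the proofs are below) =====
def Claim_equal_parse_personal_statement_py : Prop := ∀ (raw_text : String), Dom_parse_personal_statement_py raw_text → Spec_parse_personal_statement_py raw_text (parse_personal_statement_py raw_text)

-- ===== LEMMAS AND PROOFS =====

-- the reference value: one section per question line, in order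
def pvSecs : List String → List String
  | [] => []
  | l :: ls =>
    if pvIsQ l then pvSecText (ls.takeWhile (fun x => !pvIsQ x)) :: pvSecs ls else pvSecs ls

-- A's question-index list, and with the final length appended
def pvQIdx (lines : List String) : List Int :=
  ((PySem.List.enumerate lines).filter (fun p => pvIsQ p.2)).map (·.1)

def pvQFull (lines : List String) : List Int := pvQIdx lines ++ [(lines.length : Int)]

-- A's sections in zip-pair form
def pvAPairs (lines : List String) : List String :=
  ((pvQFull lines).zip (pvQFull lines).tail).map
    (fun p => pvSecText (PySem.List.slice lines (some (p.1 + 1)) (some p.2)))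

-- B's loop body on an already stripped non-empty line
def pvG (st : Bool × List String × List String) (line : String) : Bool × List String × List String :=
  if pvIsQ line then
    (if st.1 then (true, [], st.2.2 ++ [pvSecText st.2.1]) else (true, st.2.1, st.2.2))
  else if st.1 then (st.1, st.2.1 ++ [line], st.2.2) else st

theorem pv_enumerate_shift {α : Type} (xs : List α) (s : Int) :
    PySem.List.enumerate xs (s + 1) = (PySem.List.enumerate xs s).map (fun p => (p.1 + 1, p.2)) := by
  induction xs generalizing s with
  | nil => simp [PySem.List.enumerate_nil]
  | cons x xs ih => simp [PySem.List.enumerate_cons, ih (s + 1), ih s]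

theorem pvQIdx_cons (l : String) (ls : List String) :
    pvQIdx (l :: ls) =
      if pvIsQ l then 0 :: (pvQIdx ls).map (· + 1) else (pvQIdx ls).map (· + 1) := by
  unfold pvQIdx
  rw [PySem.List.enumerate_cons]
  rw [show (0 : Int) + 1 = 0 + 1 from rfl, pv_enumerate_shift ls 0]
  cases h : pvIsQ l <;>
    simp [h, List.filter_map, List.map_map, Function.comp_def]

theorem pvQIdx_nonneg (ls : List String) : ∀ x ∈ pvQIdx ls, 0 ≤ x := by
  intro x hx
  unfold pvQIdx at hx
  obtain ⟨p, hp, rfl⟩ := List.mem_map.mp hx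
  have hmem := (List.mem_filter.mp hp).1
  rw [PySem.List.mem_enumerate_iff] at hmem
  obtain ⟨k, hk, rfl⟩ := hmem
  simp

theorem pvQFull_nonneg (ls : List String) : ∀ x ∈ pvQFull ls, 0 ≤ x := by
  intro x hx
  rcases List.mem_append.mp hx with h | h
  · exact pvQIdx_nonneg ls x h
  · simp at h; omega

theorem pvQFull_cons_false (l : String) (ls : List String) (hq : pvIsQ l = false) :
    pvQFull (l :: ls) = (pvQFull ls).map (· + 1) := by
  unfold pvQFull
  rw [pvQIdx_cons]
  simp [hq]

theorem pvQFull_cons_true (l : String) (ls : List String) (hq : pvIsQ l = true) :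
    pvQFull (l :: ls) = 0 :: (pvQFull ls).map (· + 1) := by
  unfold pvQFull
  rw [pvQIdx_cons]
  simp [hq]

theorem pvQFull_head (ls : List String) :
    ∃ t, pvQFull ls = ((ls.findIdx pvIsQ : Nat) : Int) :: t := by
  induction ls with
  | nil => exact ⟨[], by simp [pvQFull, pvQIdx, PySem.List.enumerate_nil, List.findIdx_nil]⟩
  | cons l ls ih =>
    obtain ⟨t, ht⟩ := ih
    cases hq : pvIsQ l
    · refine ⟨t.map (· + 1), ?_⟩
      rw [pvQFull_cons_false l ls hq, ht]
      simp [List.findIdx_cons, hq]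
    · exact ⟨(pvQFull ls).map (· + 1), by
        rw [pvQFull_cons_true l ls hq]
        simp [List.findIdx_cons, hq]⟩

theorem pv_slice_shift (l : String) (ls : List String) (a b : Int) (ha : 0 ≤ a) (hb : 0 ≤ b) :
    PySem.List.slice (l :: ls) (some (a + 1)) (some (b + 1)) = PySem.List.slice ls (some a) (some b) := by
  rw [PySem.List.slice_toNat _ (by omega) (by omega), PySem.List.slice_toNat _ ha hb]
  have h1 : (a + 1).toNat = a.toNat + 1 := by omega
  rw [h1]
  have h2 : (b + 1).toNat - (a.toNat + 1) = b.toNat - a.toNat := by omega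
  rw [h2, List.drop_succ_cons]

theorem pv_takeWhile_take (ls : List String) :
    ls.takeWhile (fun x => !pvIsQ x) = ls.take (ls.findIdx pvIsQ) := by
  induction ls with
  | nil => rfl
  | cons l ls ih =>
    cases hq : pvIsQ l <;> simp [List.takeWhile_cons, List.findIdx_cons, hq, ih]

theorem pv_shift_pairs (l : String) (ls : List String) :
    (((pvQFull ls).map (· + 1)).zip (((pvQFull ls).map (· + 1)).tail)).map
      (fun p => pvSecText (PySem.List.slice (l :: ls) (some (p.1 + 1)) (some p.2)))
    = pvAPairs ls := by
  rw [show ((pvQFull ls).map (· + 1)).tail = ((pvQFull ls).tail).map (· + 1) from by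
    cases pvQFull ls <;> rfl]
  rw [List.zip_map, List.map_map]
  unfold pvAPairs
  apply List.map_congr_left
  rintro ⟨a, b⟩ hp
  obtain ⟨h1, h2⟩ := List.of_mem_zip hp
  have ha : 0 ≤ a := pvQFull_nonneg ls a h1
  have hb : 0 ≤ b := pvQFull_nonneg ls b (List.mem_of_mem_tail h2)
  have : a + 1 + 1 = (a + 1) + 1 := rfl
  simp only [Function.comp_def, Prod.map]
  rw [pv_slice_shift l ls (a + 1) b (by omega) hb]

theorem pvAPairs_cons (l : String) (ls : List String) :
    pvAPairs (l :: ls) =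
      if pvIsQ l then pvSecText (ls.takeWhile (fun x => !pvIsQ x)) :: pvAPairs ls
      else pvAPairs ls := by
  cases hq : pvIsQ l
  · simp only [hq, Bool.false_eq_true, if_false]
    conv_lhs => rw [pvAPairs, pvQFull_cons_false l ls hq]
    exact pv_shift_pairs l ls
  · simp only [hq, if_true]
    obtain ⟨t, ht⟩ := pvQFull_head ls
    have hs := pv_shift_pairs l ls
    unfold pvAPairs at hs
    rw [ht] at hs
    simp only [List.map_cons, List.tail_cons] at hs
    unfold pvAPairs
    rw [pvQFull_cons_true l ls hq, ht]
    simp only [List.map_cons, List.tail_cons, List.zip_cons_cons]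
    rw [hs]
    have hhead : pvSecText (PySem.List.slice (l :: ls) (some ((0 : Int) + 1))
          (some (((ls.findIdx pvIsQ : Nat) : Int) + 1)))
        = pvSecText (List.takeWhile (fun x => !pvIsQ x) ls) := by
      rw [pv_slice_shift l ls 0 ((ls.findIdx pvIsQ : Nat) : Int) le_rfl (Int.natCast_nonneg _)]
      rw [PySem.List.slice_toNat _ le_rfl (Int.natCast_nonneg _)]
      simp [pv_takeWhile_take]
    rw [hhead]

theorem pvAPairs_eq_pvSecs (ls : List String) : pvAPairs ls = pvSecs ls := by
  induction ls with
  | nil => rfl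
  | cons l ls ih => rw [pvAPairs_cons, pvSecs, ih]

theorem pvA_fold_eq_pairs (lines : List String) :
    (PySem.List.pyRange 0 (((pvQFull lines).length : Int) - 1) 1).foldl
      (fun sections idx =>
        sections ++ [pvSecText (PySem.List.slice lines
          (some (PySem.List.pyGetD (pvQFull lines) idx 0 + 1))
          (some (PySem.List.pyGetD (pvQFull lines) (idx + 1) 0)))]) [] = pvAPairs lines := by
  rw [PySem.List.foldl_append_singleton_eq_map, List.nil_append]
  unfold pvAPairs
  have hlen : 1 ≤ (pvQFull lines).length := by simp [pvQFull]
  apply List.ext_getElem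
  · simp [PySem.List.length_pyRange_one, List.length_zip]
  · intro k hk1 hk2
    have hk : k < (pvQFull lines).length - 1 := by
      simpa [PySem.List.length_pyRange_one] using hk1
    have hq1 : k < (pvQFull lines).length := by omega
    have hq2 : k + 1 < (pvQFull lines).length := by omega
    have e1 : PySem.List.pyGetD (pvQFull lines) ((k : Nat) : Int) 0 = (pvQFull lines)[k]'hq1 := by
      rw [PySem.List.pyGetD_natCast]
      exact List.getD_eq_getElem _ _ hq1
    have e2 : PySem.List.pyGetD (pvQFull lines) (((k : Nat) : Int) + 1) 0
        = (pvQFull lines)[k + 1]'hq2 := by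
      rw [show ((k : Int) + 1) = ((k + 1 : Nat) : Int) by push_cast; ring]
      rw [PySem.List.pyGetD_natCast]
      exact List.getD_eq_getElem _ _ hq2
    simp only [List.getElem_map, PySem.List.getElem_pyRange_one, List.getElem_zip,
      List.getElem_tail, zero_add, e1, e2]

-- B's fold with started = true, flushed at the end
theorem pvB_true (ls : List String) : ∀ cur acc,
    (if (ls.foldl pvG (true, cur, acc)).1 then
        (ls.foldl pvG (true, cur, acc)).2.2 ++ [pvSecText (ls.foldl pvG (true, cur, acc)).2.1]
      else (ls.foldl pvG (true, cur, acc)).2.2)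
    = acc ++ (pvSecText (cur ++ ls.takeWhile (fun x => !pvIsQ x)) :: pvSecs ls) := by
  induction ls with
  | nil => intro cur acc; simp [pvSecs]
  | cons x t ih =>
    intro cur acc
    cases hx : pvIsQ x
    · simp only [List.foldl_cons]
      rw [show pvG (true, cur, acc) x = (true, cur ++ [x], acc) by simp [pvG, hx]]
      rw [ih]
      simp [pvSecs, List.takeWhile_cons, hx, List.append_assoc]
    · simp only [List.foldl_cons]
      rw [show pvG (true, cur, acc) x = (true, [], acc ++ [pvSecText cur]) by simp [pvG, hx]]
      rw [ih]
      simp [pvSecs, List.takeWhile_cons, hx]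

-- B's fold from the initial state, flushed at the end
theorem pvB_false (ls : List String) : ∀ acc,
    (if (ls.foldl pvG (false, [], acc)).1 then
        (ls.foldl pvG (false, [], acc)).2.2 ++ [pvSecText (ls.foldl pvG (false, [], acc)).2.1]
      else (ls.foldl pvG (false, [], acc)).2.2)
    = acc ++ pvSecs ls := by
  induction ls with
  | nil => intro acc; simp [pvSecs]
  | cons x t ih =>
    intro acc
    cases hx : pvIsQ x
    · simp only [List.foldl_cons]
      rw [show pvG (false, [], acc) x = (false, [], acc) by simp [pvG, hx]]
      rw [ih]
      simp [pvSecs, hx]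
    · simp only [List.foldl_cons]
      rw [show pvG (false, [], acc) x = (true, [], acc) by simp [pvG, hx]]
      rw [pvB_true t [] acc]
      simp [pvSecs, hx]

-- the raw fold of B equals the fold over the stripped non-empty lines
set_option maxHeartbeats 1600000 in
theorem pvB_strip_filter (xs : List String) : ∀ st,
    xs.foldl pvStepB st =
      ((xs.filter (fun i => PySem.Str.len (PySem.Str.strip i) > 0)).map PySem.Str.strip).foldl pvG st := by
  induction xs with
  | nil => intro st; rfl
  | cons x t ih =>
    intro st
    by_cases hnil : PySem.Chars.strip x.toList = []
    · rw [List.foldl_cons, show pvStepB st x = st from by simp [pvStepB, hnil], ih st]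
      simp [List.filter_cons, hnil]
    · rw [List.foldl_cons,
        show pvStepB st x = pvG st (PySem.Str.strip x) from by simp [pvStepB, pvG, hnil],
        ih (pvG st (PySem.Str.strip x))]
      have hlenpos : 0 < (PySem.Chars.strip x.toList).length := List.length_pos_of_ne_nil hnil
      simp [List.filter_cons, hlenpos]

-- A's whole sections pipeline computes pvSecs, stated in the port's inline form
set_option maxHeartbeats 1000000 in
theorem pvA_main (lines : List String) :
    (PySem.List.pyRange 0
        ((((((PySem.List.enumerate lines).filter
              (fun p => pvQuestions.any (fun q => PySem.Str.isIn q p.2))).map (·.1)) ++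
            [(lines.length : Int)]).length : Int) - 1) 1).foldl
      (fun sections idx =>
        sections ++
          [PySem.Str.strip (PySem.Str.join " " (PySem.List.slice lines
            (some (PySem.List.pyGetD ((((PySem.List.enumerate lines).filter
                (fun p => pvQuestions.any (fun q => PySem.Str.isIn q p.2))).map (·.1)) ++
                [(lines.length : Int)]) idx 0 + 1))
            (some (PySem.List.pyGetD ((((PySem.List.enumerate lines).filter
                (fun p => pvQuestions.any (fun q => PySem.Str.isIn q p.2))).map (·.1)) ++
                [(lines.length : Int)]) (idx + 1) 0))))]) [] = pvSecs lines :=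
  (pvA_fold_eq_pairs lines).trans (pvAPairs_eq_pvSecs lines)

theorem pvPadA_of_ge (S : List String) (h : 3 ≤ S.length) : pvPadA S = S := by
  unfold pvPadA
  rw [dif_neg (by omega)]

theorem pvPadA_step (S : List String) (h : S.length < 3) : pvPadA S = pvPadA (S ++ [""]) := by
  conv_lhs => rw [pvPadA]
  rw [dif_pos h]

-- padding endgame: A's while-pad and B's append-three give the same three components
set_option maxHeartbeats 1600000 in
theorem pv_endgame (S : List String) :
    (PySem.List.pyGetD (pvPadA S) 0 "", PySem.List.pyGetD (pvPadA S) 1 "", PySem.List.pyGetD (pvPadA S) 2 "") =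
    (PySem.List.pyGetD (S ++ ["", "", ""]) 0 "", PySem.List.pyGetD (S ++ ["", "", ""]) 1 "",
      PySem.List.pyGetD (S ++ ["", "", ""]) 2 "") := by
  rcases S with _ | ⟨a, _ | ⟨b, _ | ⟨c, r⟩⟩⟩
  · rw [pvPadA_step [] (by simp), pvPadA_step ([] ++ [""]) (by simp),
      pvPadA_step (([] ++ [""]) ++ [""]) (by simp),
      pvPadA_of_ge ((([] ++ [""]) ++ [""]) ++ [""]) (by simp)]
    try simp only [PySem.List.pyGetD_ofNat', List.cons_append]
    try rfl
  · rw [pvPadA_step [a] (by simp), pvPadA_step ([a] ++ [""]) (by simp),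
      pvPadA_of_ge (([a] ++ [""]) ++ [""]) (by simp)]
    try simp only [PySem.List.pyGetD_ofNat', List.cons_append]
    try rfl
  · rw [pvPadA_step [a, b] (by simp), pvPadA_of_ge ([a, b] ++ [""]) (by simp)]
    try simp only [PySem.List.pyGetD_ofNat', List.cons_append]
    try rfl
  · rw [pvPadA_of_ge (a :: b :: c :: r) (by simp)]
    try simp only [PySem.List.pyGetD_ofNat', List.cons_append]
    try rfl

-- ===== VERDICT (by name: the statement is the Claim_ definition above) =====
set_option maxHeartbeats 1000000 in
theorem parse_personal_statement_py_spec : Claim_equal_parse_personal_statement_py := by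
  intro raw _
  show parse_personal_statement_py raw = parse_personal_statement_py_alt raw
  unfold parse_personal_statement_py parse_personal_statement_py_alt
  dsimp only
  rw [pvA_main]
  rw [pvB_strip_filter]
  rw [pvB_false]
  rw [List.nil_append]
  exact pv_endgame _
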